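-- pv_equiv track=rewrite | github.com/eliottcassidy2000/math | 04-computation/bilinear_structure.py | G_T_formula
-- ===== SOURCE A (Python) =====
-- from math import comb, factorial
--
-- def eulerian_number(n, k):
--     return sum((-1)**j * comb(n+1, j) * (k+1-j)**n for j in range(k+1))
--
-- def G_T_formula(n, inv_vals, t, x):
--     """Compute G_T(t, x) via the trivariate GF formula."""
--     d = n - 1
--     result = sum(eulerian_number(n, k) * t**k for k in range(n))
--
--     if n == 5:
--         invariants = [('t3', 2, 1), ('t5', 0, 1)]
--     elif n == 7:
--         invariants = [('t3', 4, 1), ('t5', 2, 1), ('t7', 0, 1), ('bc', 2, 2)]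
--     else:
--         return result
--
--     for name, f, parts in invariants:
--         val = inv_vals.get(name, 0)
--         if val == 0: continue
--         A_f1_t = sum(eulerian_number(f+1, j) * t**j for j in range(f+1))
--         result += x**parts * val * A_f1_t * (t-1)**(d-f)
--
--     return result
-- ===== SOURCE B (Python) =====
-- def G_T_formula(n, inv_vals, t, x):
--     """Compute G_T(t, x) via the trivariate GF formula, building the Eulerian
--     triangle once by the recurrence A(m,k) = (k+1)*A(m-1,k) + (m-k)*A(m-1,k-1)
--     (starting from A(0,0) = 1) and evaluating each row polynomial by Horner."""
--     if n <= 0: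
--         return 0
--
--     def eulerian_rows(limit):
--         rows = [[1]]  # row 0: A(0,0) = 1
--         for m in range(1, limit + 1):
--             prev = rows[-1]
--             rows.append([(k + 1) * (prev[k] if k < len(prev) else 0)
--                          + (m - k) * (prev[k - 1] if k >= 1 else 0)
--                          for k in range(m)])
--         return rows
--
--     def horner(coeffs):  # sum(coeffs[k] * t**k for k in range(len(coeffs)))
--         acc = 0
--         for c in reversed(coeffs):
--             acc = acc * t + c
--         return acc
--
--     TABLE = {5: [('t3', 2, 1), ('t5', 0, 1)],
--              7: [('t3', 4, 1), ('t5', 2, 1), ('t7', 0, 1), ('bc', 2, 2)]}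
--
--     rows = eulerian_rows(n)
--     return horner(rows[n]) + sum(
--         x ** parts * inv_vals.get(name, 0) * horner(rows[f + 1]) * (t - 1) ** (n - 1 - f)
--         for name, f, parts in TABLE.get(n, [])
--         if inv_vals.get(name, 0) != 0)
-- ===== Notes on version B (the rewrite author's own statement) =====
-- stated objective: faster
-- what changed: B replaces the closed-form eulerian_number (an alternating binomial sum recomputed for every coefficient) by one dynamic-programming build of the Eulerian triangle via A(m,k)=(k+1)A(m-1,k)+(m-k)A(m-1,k-1) and evaluates each row polynomial by Horner's rule, with the invariant corrections summed over a table comprehension instead of A's skip-loop.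
import Mathlib
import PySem

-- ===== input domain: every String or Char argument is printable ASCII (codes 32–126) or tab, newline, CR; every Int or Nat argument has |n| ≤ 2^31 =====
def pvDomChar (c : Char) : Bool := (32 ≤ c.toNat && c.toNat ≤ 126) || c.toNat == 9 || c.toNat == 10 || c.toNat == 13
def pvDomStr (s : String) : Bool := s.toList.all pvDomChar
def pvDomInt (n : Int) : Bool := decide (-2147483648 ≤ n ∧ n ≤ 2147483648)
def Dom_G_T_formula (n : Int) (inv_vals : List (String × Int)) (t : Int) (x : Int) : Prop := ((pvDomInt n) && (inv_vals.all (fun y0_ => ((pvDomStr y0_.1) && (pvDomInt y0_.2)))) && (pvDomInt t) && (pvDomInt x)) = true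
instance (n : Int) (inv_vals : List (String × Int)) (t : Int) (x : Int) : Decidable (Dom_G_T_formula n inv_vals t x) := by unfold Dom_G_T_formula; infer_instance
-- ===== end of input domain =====

-- B builds the Eulerian triangle by the recurrence A(m,k)=(k+1)A(m-1,k)+(m-k)A(m-1,k-1) and
-- evaluates each row by Horner, replacing A's per-coefficient alternating binomial sums.

-- ===== PORT A =====
-- comb(nn+1, j): every call site has nn + 1 ≥ 1 and j ≥ 0, where Nat.choose is exact.
def pvEulerA (nn k : Int) : Int :=
  (PySem.List.pyRange 0 (k + 1) 1).foldl
    (fun acc j => acc + (-1) ^ j.toNat * ((nn + 1).toNat.choose j.toNat : Int) * (k + 1 - j) ^ nn.toNat) 0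

-- sum(eulerian_number(nn, k) * t**k for k in range(nn))
def pvASum (nn t : Int) : Int :=
  (PySem.List.pyRange 0 nn 1).foldl (fun acc k => acc + pvEulerA nn k * t ^ k.toNat) 0

-- one iteration of A's 'for name, f, parts in invariants' loop
def pvInvStepA (inv_vals : List (String × Int)) (d t x : Int) (res : Int) (it : String × Int × Int) : Int :=
  let val := (PySem.Dict.mk inv_vals).getD it.1 0
  if val = 0 then res
  else res + x ^ (it.2.2).toNat * val * pvASum (it.2.1 + 1) t * (t - 1) ^ (d - it.2.1).toNat

def G_T_formula (n : Int) (inv_vals : List (String × Int)) (t : Int) (x : Int) : Int :=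
  let d := n - 1
  let result := pvASum n t
  if n = 5 then
    [("t3", ((2 : Int), (1 : Int))), ("t5", (0, 1))].foldl (pvInvStepA inv_vals d t x) result
  else if n = 7 then
    [("t3", ((4 : Int), (1 : Int))), ("t5", (2, 1)), ("t7", (0, 1)), ("bc", (2, 2))].foldl
      (pvInvStepA inv_vals d t x) result
  else result

-- ===== PORT B =====
-- one comprehension row of B's eulerian_rows: row m from row m-1
-- (prev[k] if k < len(prev) else 0 → List.getD, exact for the Nat index k)
def pvNextRow (m : Nat) (prev : List Int) : List Int :=
  (List.range m).map (fun k : Nat =>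
    ((k : Int) + 1) * prev.getD k 0 + ((m : Int) - (k : Int)) * (if 1 ≤ k then prev.getD (k - 1) 0 else 0))

-- B's eulerian_rows(limit) loop; rows is never empty, so rows[-1] is its last element
def pvRows (limit : Nat) : List (List Int) :=
  (List.range limit).foldl (fun rows i => rows ++ [pvNextRow (i + 1) (rows.getLastD [])]) [[1]]

-- B's horner: acc = acc * t + c over the reversed coefficient list
def pvHorner (t : Int) (coeffs : List Int) : Int :=
  coeffs.reverse.foldl (fun acc c => acc * t + c) 0

-- the literal TABLE.get(n, [])
def pvTable (n : Int) : List (String × Int × Int) :=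
  if n = 5 then [("t3", ((2 : Int), (1 : Int))), ("t5", (0, 1))]
  else if n = 7 then [("t3", ((4 : Int), (1 : Int))), ("t5", (2, 1)), ("t7", (0, 1)), ("bc", (2, 2))]
  else []

def G_T_formula_alt (n : Int) (inv_vals : List (String × Int)) (t : Int) (x : Int) : Int :=
  if n ≤ 0 then 0
  else
    let rows := pvRows n.toNat
    pvHorner t (rows.getD n.toNat []) +
      (((pvTable n).filter (fun it => (PySem.Dict.mk inv_vals).getD it.1 0 != 0)).map
        (fun it => x ^ (it.2.2).toNat * (PySem.Dict.mk inv_vals).getD it.1 0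
          * pvHorner t (rows.getD (it.2.1 + 1).toNat []) * (t - 1) ^ (n - 1 - it.2.1).toNat)).sum

-- ===== PRECONDITION & SPEC =====
def Spec_G_T_formula (n : Int) (inv_vals : List (String × Int)) (t : Int) (x : Int) (out : Int) : Prop := out = G_T_formula_alt n inv_vals t x
instance (n : Int) (inv_vals : List (String × Int)) (t : Int) (x : Int) (out : Int) : Decidable (Spec_G_T_formula n inv_vals t x out) := by unfold Spec_G_T_formula; infer_instance

-- ===== CLAIM (what is proved, stated in full; the proofs are below) =====
def Claim_equal_G_T_formula : Prop := ∀ (n : Int) (inv_vals : List (String × Int)) (t : Int) (x : Int), Dom_G_T_formula n inv_vals t x → Spec_G_T_formula n inv_vals t x (G_T_formula n inv_vals t x)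

-- ===== LEMMAS AND PROOFS =====

-- the closed-form Eulerian number A's eulerian_number computes (proof abbreviation only)
def pvS (n k : Nat) : Int :=
  ∑ j ∈ Finset.range (k + 1), (-1 : Int) ^ j * ((n + 1).choose j : Int) * ((k : Int) + 1 - j) ^ n

-- the row B's dp must produce
def pvSpecRow (m : Nat) : List Int :=
  if m = 0 then [1] else (List.range m).map (fun k => pvS m k)

-- additive foldl over range(0, M) is a Finset sum
lemma pv_foldl_range_sum (g : Int → Int) (M : Nat) (c : Int) :
    (PySem.List.pyRange 0 (M : Int) 1).foldl (fun a j => a + g j) c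
      = c + ∑ i ∈ Finset.range M, g (i : Int) := by
  induction M generalizing c with
  | zero => simp [PySem.List.pyRange_one_eq_nil]
  | succ M ih =>
    have h : ((M + 1 : Nat) : Int) = (M : Int) + 1 := by push_cast; ring
    rw [h, PySem.List.pyRange_one_succ_right (by positivity), List.foldl_append, ih]
    simp [Finset.sum_range_succ]
    ring

lemma pvEulerA_eq (M k : Nat) : pvEulerA (M : Int) (k : Int) = pvS M k := by
  unfold pvEulerA pvS
  have h : ((k : Int) + 1) = ((k + 1 : Nat) : Int) := by push_cast; ring
  rw [h, pv_foldl_range_sum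
    (fun j => (-1) ^ j.toNat * (((M : Int) + 1).toNat.choose j.toNat : Int)
        * (((k + 1 : Nat) : Int) - j) ^ (M : Int).toNat) (k + 1) 0]
  rw [zero_add]
  refine Finset.sum_congr rfl fun j hj => ?_
  have e1 : (((M : Int) + 1)).toNat = M + 1 := by omega
  have e2 : ((j : Int)).toNat = j := by omega
  have e3 : ((M : Int)).toNat = M := by omega
  rw [e1, e2, e3]

lemma pvASum_eq_sum (M : Nat) (t : Int) :
    pvASum (M : Int) t = ∑ k ∈ Finset.range M, pvS M k * t ^ k := by
  unfold pvASum
  rw [pv_foldl_range_sum (fun k => pvEulerA (M : Int) k * t ^ k.toNat) M 0, zero_add]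
  refine Finset.sum_congr rfl fun k hk => ?_
  have e : ((k : Int)).toNat = k := by omega
  rw [e, pvEulerA_eq]

lemma pvASum_nonpos (n t : Int) (h : n ≤ 0) : pvASum n t = 0 := by
  unfold pvASum
  rw [PySem.List.pyRange_one_eq_nil (by omega)]
  rfl

-- first column of the closed form
lemma pvS_zero (n : Nat) : pvS n 0 = 1 := by
  simp [pvS]

-- the Eulerian recurrence holds for the closed form
lemma pvS_rec (n K : Nat) (hkn : K ≤ n) :
    pvS (n + 1) (K + 1)
      = (((K : Int) + 1) + 1) * pvS n (K + 1) + ((n : Int) + 1 - (K + 1)) * pvS n K := by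
  unfold pvS
  have key : ∀ j ∈ Finset.range (K + 1),
      (-1 : Int) ^ (j + 1) * (((n + 1) + 1).choose (j + 1) : Int) * (((K + 1 : Nat) : Int) + 1 - ((j + 1 : Nat) : Int)) ^ (n + 1)
        = ((((K : Int) + 1) + 1) * ((-1 : Int) ^ (j + 1) * ((n + 1).choose (j + 1) : Int) * (((K + 1 : Nat) : Int) + 1 - ((j + 1 : Nat) : Int)) ^ n)
            + (((n : Int) + 1 - ((K : Int) + 1)) * ((-1 : Int) ^ j * ((n + 1).choose j : Int) * (((K : Int) + 1) - j) ^ n))) := by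
    intro j hj
    have hjK : j < K + 1 := Finset.mem_range.mp hj
    have hcs : (((n + 1) + 1).choose (j + 1) : Int) = ((n + 1).choose j : Int) + ((n + 1).choose (j + 1) : Int) := by
      rw [Nat.choose_succ_succ (n + 1) j]; push_cast; ring
    have hid : ((n + 1).choose (j + 1) : Int) * ((j : Int) + 1) = ((n + 1).choose j : Int) * ((n : Int) + 1 - j) := by
      have h0 := Nat.choose_succ_right_eq (n + 1) j
      have hj' : j ≤ n + 1 := by omega
      calc ((n + 1).choose (j + 1) : Int) * ((j : Int) + 1)
            = (((n + 1).choose (j + 1) * (j + 1) : Nat) : Int) := by push_cast; ring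
        _ = (((n + 1).choose j * (n + 1 - j) : Nat) : Int) := by rw [h0]
        _ = ((n + 1).choose j : Int) * ((n : Int) + 1 - j) := by push_cast [hj']; ring
    rw [hcs]
    push_cast
    linear_combination ((-1 : Int) ^ j * ((K : Int) + 1 - (j : Int)) ^ n) * hid
  rw [Finset.sum_range_succ' (fun j => (-1 : Int) ^ j * (((n + 1) + 1).choose j : Int) * (((K + 1 : Nat) : Int) + 1 - j) ^ (n + 1))]
  rw [Finset.sum_range_succ' (fun j => (-1 : Int) ^ j * ((n + 1).choose j : Int) * (((K + 1 : Nat) : Int) + 1 - j) ^ n)]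
  rw [Finset.sum_congr rfl key, Finset.sum_add_distrib]
  rw [mul_add, Finset.mul_sum, Finset.mul_sum]
  simp only [Nat.choose_zero_right, pow_zero, Nat.cast_one, Nat.cast_zero, one_mul, sub_zero]
  push_cast
  ring

-- the diagonal of the closed form vanishes (n ≥ 1): it is the (n+1)-st forward difference of x^n
lemma pvS_diag (n : Nat) (hn : 1 ≤ n) : pvS n n = 0 := by
  have hzero : (fwdDiff (1 : Int))^[n + 1] (fun r : Int => r ^ n) = 0 :=
    fwdDiff_iter_pow_eq_zero_of_lt (Nat.lt_succ_self n)
  have hsum := fwdDiff_iter_eq_sum_shift (1 : Int) (fun r : Int => r ^ n) (n + 1) 0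
  rw [hzero] at hsum
  simp only [Pi.zero_apply] at hsum
  have h0 : (0 : Int)
      = ∑ k ∈ Finset.range (n + 2), (-1 : Int) ^ (n + 1 - k) * ((n + 1).choose k : Int) * (k : Int) ^ n := by
    refine hsum.trans (Finset.sum_congr rfl fun k hk => ?_)
    simp [mul_assoc]
  rw [← Finset.sum_range_reflect] at h0
  have hsplit : ∀ j ∈ Finset.range (n + 2),
      (-1 : Int) ^ (n + 1 - (n + 2 - 1 - j)) * ((n + 1).choose (n + 2 - 1 - j) : Int) * ((n + 2 - 1 - j : Nat) : Int) ^ n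
        = (if j ≤ n then (-1 : Int) ^ j * ((n + 1).choose j : Int) * ((n : Int) + 1 - (j : Int)) ^ n else 0) := by
    intro j hj
    have hj' : j < n + 2 := Finset.mem_range.mp hj
    by_cases hcase : j ≤ n
    · rw [if_pos hcase]
      have e1 : n + 2 - 1 - j = n + 1 - j := by omega
      have e2 : n + 1 - (n + 1 - j) = j := by omega
      have e3 : ((n + 1 - j : Nat) : Int) = (n : Int) + 1 - j := by omega
      rw [e1, e2, Nat.choose_symm (by omega), e3]
    · rw [if_neg hcase]
      have e1 : n + 2 - 1 - j = 0 := by omega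
      rw [e1]
      simp [zero_pow (by omega : n ≠ 0)]
  rw [Finset.sum_congr rfl hsplit, Finset.sum_range_succ, if_neg (by omega), add_zero] at h0
  have h1 : ∑ j ∈ Finset.range (n + 1),
        (if j ≤ n then (-1 : Int) ^ j * ((n + 1).choose j : Int) * ((n : Int) + 1 - (j : Int)) ^ n else 0)
      = ∑ j ∈ Finset.range (n + 1), (-1 : Int) ^ j * ((n + 1).choose j : Int) * ((n : Int) + 1 - (j : Int)) ^ n :=
    Finset.sum_congr rfl fun j hj => if_pos (Nat.lt_succ_iff.mp (Finset.mem_range.mp hj))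
  rw [h1] at h0
  unfold pvS
  exact h0.symm

lemma pv_getD_map_range {α : Type} (f : Nat → α) (M k : Nat) (d : α) :
    ((List.range M).map f).getD k d = if k < M then f k else d := by
  by_cases h : k < M
  · rw [if_pos h, List.getD_eq_getElem _ _ (by simpa using h)]
    simp
  · rw [if_neg h, List.getD_eq_default _ _ (by simpa using Nat.le_of_not_lt h)]

lemma pvSpecRow_pos (m : Nat) (h : m ≠ 0) :
    pvSpecRow m = (List.range m).map (fun k => pvS m k) := by
  unfold pvSpecRow; rw [if_neg h]

-- one dp step reproduces the closed-form row
lemma pvNextRow_spec (M : Nat) : pvNextRow (M + 1) (pvSpecRow M) = pvSpecRow (M + 1) := by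
  rcases M with _ | M'
  · rw [pvSpecRow_pos 1 one_ne_zero]
    unfold pvSpecRow
    rw [if_pos rfl]
    unfold pvNextRow
    refine List.map_congr_left fun k hk => ?_
    have hk0 : k = 0 := by simpa using hk
    subst hk0
    simp [pvS_zero]
  · rw [pvSpecRow_pos (M' + 1 + 1) (by omega), pvSpecRow_pos (M' + 1) (by omega)]
    unfold pvNextRow
    refine List.map_congr_left fun k hk => ?_
    have hkM : k < M' + 1 + 1 := by simpa using hk
    rw [pv_getD_map_range, pv_getD_map_range]
    split_ifs with h1 h2 h3
    · obtain ⟨K, rfl⟩ : ∃ K, k = K + 1 := ⟨k - 1, by omega⟩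
      simp only [Nat.add_sub_cancel]
      rw [pvS_rec (M' + 1) K (by omega)]
      push_cast
      ring
    · omega
    · have hk0 : k = 0 := by omega
      subst hk0
      rw [pvS_zero, pvS_zero]
      push_cast
      ring
    · have hkM' : k = M' + 1 := by omega
      subst hkM'
      simp only [Nat.add_sub_cancel]
      rw [pvS_rec (M' + 1) M' (by omega), pvS_diag (M' + 1) (by omega)]
      push_cast
      ring
    · omega
    · omega

-- the dp rows list is exactly the closed-form rows
lemma pvRows_eq (L : Nat) : pvRows L = (List.range (L + 1)).map pvSpecRow := by
  induction L with
  | zero => simp [pvRows, pvSpecRow]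
  | succ L ih =>
    have hstep : pvRows (L + 1)
        = pvRows L ++ [pvNextRow (L + 1) ((pvRows L).getLastD [])] := by
      unfold pvRows
      rw [List.range_succ, List.foldl_append]
      rfl
    rw [hstep, ih]
    have hlast : (((List.range (L + 1)).map pvSpecRow).getLastD []) = pvSpecRow L := by
      rw [List.range_succ, List.map_append]
      simp
    rw [hlast, pvNextRow_spec]
    rw [List.range_succ (n := L + 1), List.map_append]
    simp

-- horner is the coefficient sum
lemma pvHorner_eq (t : Int) (cs : List Int) :
    pvHorner t cs = ∑ i ∈ Finset.range cs.length, cs.getD i 0 * t ^ i := by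
  unfold pvHorner
  rw [List.foldl_reverse]
  induction cs with
  | nil => simp
  | cons c cs ih =>
    rw [List.foldr_cons, ih]
    rw [List.length_cons, Finset.sum_range_succ' (fun i => (c :: cs).getD i 0 * t ^ i)]
    simp only [List.getD_cons_succ, List.getD_cons_zero, pow_zero, mul_one]
    rw [Finset.sum_mul]
    refine congrArg₂ (· + ·) (Finset.sum_congr rfl fun i hi => ?_) rfl
    rw [pow_succ]
    ring

-- bridge: horner of dp row k equals A's coefficient sum (1 ≤ k ≤ L)
lemma pvHorner_row (L k : Nat) (hk : 1 ≤ k) (hkL : k ≤ L) (t : Int) :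
    pvHorner t ((pvRows L).getD k []) = pvASum (k : Int) t := by
  rw [pvRows_eq, pv_getD_map_range, if_pos (by omega)]
  unfold pvSpecRow
  rw [if_neg (by omega), pvHorner_eq, pvASum_eq_sum]
  simp only [List.length_map, List.length_range]
  refine Finset.sum_congr rfl fun i hi => ?_
  rw [pv_getD_map_range, if_pos (by simpa using hi)]

-- same bridge with Int indices as they occur in the ports
lemma pvHorner_row' (Lz k : Int) (hk : 1 ≤ k) (hkL : k ≤ Lz) (t : Int) :
    pvHorner t ((pvRows Lz.toNat).getD k.toNat []) = pvASum k t := by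
  have h := pvHorner_row Lz.toNat k.toNat (by omega) (by omega) t
  rw [h, show ((k.toNat : Nat) : Int) = k by omega]

-- A's invariant loop as init + filtered sum
lemma pvLoopA_eq (inv_vals : List (String × Int)) (d t x : Int) (L : List (String × Int × Int)) (init : Int) :
    L.foldl (pvInvStepA inv_vals d t x) init
      = init + ((L.filter (fun it => (PySem.Dict.mk inv_vals).getD it.1 0 != 0)).map
          (fun it => x ^ (it.2.2).toNat * (PySem.Dict.mk inv_vals).getD it.1 0
            * pvASum (it.2.1 + 1) t * (t - 1) ^ (d - it.2.1).toNat)).sum := by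
  induction L generalizing init with
  | nil => simp
  | cons hd tl ih =>
    rw [List.foldl_cons, ih]
    unfold pvInvStepA
    by_cases h : (PySem.Dict.mk inv_vals).getD hd.1 0 = 0
    · rw [if_pos h]
      simp [h]
    · rw [if_neg h]
      simp only [List.filter_cons, bne_iff_ne, ne_eq, h, not_false_eq_true, if_pos]
      rw [List.map_cons, List.sum_cons]
      ring

-- ===== VERDICT (by name: the statement is the Claim_ definition above) =====
theorem G_T_formula_spec : Claim_equal_G_T_formula := by
  intro n inv_vals t x _
  unfold Spec_G_T_formula G_T_formula G_T_formula_alt pvTable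
  dsimp only
  by_cases h5 : n = 5
  · subst h5
    rw [if_pos rfl, if_neg (by norm_num), if_pos rfl]
    rw [pvLoopA_eq]
    rw [pvHorner_row' 5 5 (by norm_num) (by norm_num)]
    congr 1
    refine congrArg List.sum (List.map_congr_left fun it hit => ?_)
    have hmem := (List.mem_filter.mp hit).1
    simp only [List.mem_cons, List.not_mem_nil, or_false] at hmem
    rcases hmem with rfl | rfl
    · rw [pvHorner_row' 5 ((2 : Int) + 1) (by norm_num) (by norm_num)]
    · rw [pvHorner_row' 5 ((0 : Int) + 1) (by norm_num) (by norm_num)]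
  · by_cases h7 : n = 7
    · subst h7
      rw [if_neg (by norm_num), if_pos rfl, if_neg (by norm_num), if_neg (by norm_num), if_pos rfl]
      rw [pvLoopA_eq]
      rw [pvHorner_row' 7 7 (by norm_num) (by norm_num)]
      congr 1
      refine congrArg List.sum (List.map_congr_left fun it hit => ?_)
      have hmem := (List.mem_filter.mp hit).1
      simp only [List.mem_cons, List.not_mem_nil, or_false] at hmem
      rcases hmem with rfl | rfl | rfl | rfl
      · rw [pvHorner_row' 7 ((4 : Int) + 1) (by norm_num) (by norm_num)]
      · rw [pvHorner_row' 7 ((2 : Int) + 1) (by norm_num) (by norm_num)]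
      · rw [pvHorner_row' 7 ((0 : Int) + 1) (by norm_num) (by norm_num)]
      · rw [pvHorner_row' 7 ((2 : Int) + 1) (by norm_num) (by norm_num)]
    · rw [if_neg h5, if_neg h7, if_neg h5, if_neg h7]
      by_cases hpos : n ≤ 0
      · rw [if_pos hpos]
        exact pvASum_nonpos n t hpos
      · rw [if_neg hpos]
        simp only [List.filter_nil, List.map_nil, List.sum_nil, add_zero]
        rw [pvHorner_row' n n (by omega) (by omega)]
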